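-- pv_equiv track=rewrite | github.com/jshiles/adventofcode_2024 | day07.py | all_possible
-- ===== SOURCE A (Python) =====
-- def all_possible(input: list[int], combine: bool = False) -> list[int]:
--     """
--     Computes all possible outcomes using three operators: "+", "*", and optionally
--     "||" in a left to right computation. Returns those possibilities in a list.
--     """
--     combine_fn = lambda x, y: x * 10 ** len(str(y)) + y
--     prev_vals = [input[0]]
--     for x in input[1:]:
--         new_prev_vals = []
--         for y in prev_vals:
--             new_prev_vals.append(x + y)
--             new_prev_vals.append(x * y)
--             if combine:
--                 new_prev_vals.append(combine_fn(y, x))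
--         prev_vals = new_prev_vals
--     return prev_vals
-- ===== SOURCE B (Python) =====
-- def all_possible(input: list[int], combine: bool = False) -> list[int]:
--     """
--     Two-phase re-implementation: first generate all operator sequences
--     (earliest position varying slowest, per-position order +,*,||),
--     then evaluate each sequence left-to-right over the input.
--     """
--     ops = ['+', '*', '||'] if combine else ['+', '*']
--
--     def apply(op, acc, x):
--         if op == '+':
--             return acc + x
--         if op == '*':
--             return acc * x
--         return acc * 10 ** len(str(x)) + x
--
--     rest = input[1:]
--     seqs = [[]]
--     for _ in rest:
--         seqs = [s + [op] for s in seqs for op in ops]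
--
--     def evaluate(s):
--         acc = input[0]
--         for op, x in zip(s, rest):
--             acc = apply(op, acc, x)
--         return acc
--
--     return [evaluate(s) for s in seqs]
-- ===== Notes on version B (the rewrite author's own statement) =====
-- stated objective: alternative
-- what changed: B separates the search into two phases - it first enumerates all operator sequences explicitly and then evaluates each sequence left-to-right over the input - instead of A's layer-by-layer BFS that interleaves operator choice with evaluation.
-- outside the precondition, e.g. on all_possible([], False): A raises IndexError, B raises IndexError
import Mathlib
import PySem

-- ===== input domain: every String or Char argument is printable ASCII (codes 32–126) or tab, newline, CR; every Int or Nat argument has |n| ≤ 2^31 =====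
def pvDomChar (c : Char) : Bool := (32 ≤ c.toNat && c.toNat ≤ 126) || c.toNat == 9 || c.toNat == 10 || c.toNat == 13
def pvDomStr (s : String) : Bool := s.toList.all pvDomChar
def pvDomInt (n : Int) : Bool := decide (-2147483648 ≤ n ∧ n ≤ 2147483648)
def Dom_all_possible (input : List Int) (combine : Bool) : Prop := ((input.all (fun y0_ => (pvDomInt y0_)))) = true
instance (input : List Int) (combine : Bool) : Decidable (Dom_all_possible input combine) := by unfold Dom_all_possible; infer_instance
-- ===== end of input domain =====

-- B replaces A's layer-by-layer BFS with a two-phase enumerate-operator-sequences-then-evaluate decomposition (same cost).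


-- ===== PORT A =====
-- combine_fn x y = x * 10 ** len(str(y)) + y  (str via PySem.Int.toChars, exact incl. '-' sign)
def pvCombineFn (x y : Int) : Int := x * 10 ^ (PySem.Int.toChars y).length + y

def all_possible (input : List Int) (combine : Bool) : List Int :=
  match input with
  | [] => []   -- Python raises IndexError on input[0]; excluded by Pre_
  | h :: t =>
    t.foldl (fun prev_vals x =>
      prev_vals.foldl (fun new_prev_vals y =>
        (new_prev_vals ++ [x + y] ++ [x * y]) ++
          (if combine then [pvCombineFn y x] else [])) []) [h]

-- ===== PORT B =====
def pvApply (op : String) (acc x : Int) : Int :=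
  if op = "+" then acc + x
  else if op = "*" then acc * x
  else acc * 10 ^ (PySem.Int.toChars x).length + x

def all_possible_alt (input : List Int) (combine : Bool) : List Int :=
  match input with
  | [] => []   -- Python raises IndexError on input[0]; excluded by Pre_
  | h :: rest =>
    let ops : List String := if combine then ["+", "*", "||"] else ["+", "*"]
    let seqs := rest.foldl (fun ss _ => ss.flatMap (fun s => ops.map (fun op => s ++ [op]))) [[]]
    seqs.map (fun s => (s.zip rest).foldl (fun acc p => pvApply p.1 acc p.2) h)

-- ===== PRECONDITION & SPEC =====
-- Pre_ excludes only the empty list, on which the Python A raises IndexError (input[0]).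
def Pre_all_possible (input : List Int) (combine : Bool) : Prop := input ≠ []
instance (input : List Int) (combine : Bool) : Decidable (Pre_all_possible input combine) := by unfold Pre_all_possible; infer_instance
def pvWitness_all_possible : List Int × Bool := ([1, 2, 3], true)

def Spec_all_possible (input : List Int) (combine : Bool) (out : List Int) : Prop := out = all_possible_alt input combine
instance (input : List Int) (combine : Bool) (out : List Int) : Decidable (Spec_all_possible input combine out) := by unfold Spec_all_possible; infer_instance

-- ===== CLAIM (what is proved, stated in full; the proofs are below) =====
def Claim_equal_all_possible : Prop := ∀ (input : List Int) (combine : Bool), Dom_all_possible input combine → Pre_all_possible input combine → Spec_all_possible input combine (all_possible input combine)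

-- ===== LEMMAS AND PROOFS =====

-- the prepend-form product of operator sequences of length t.length
def pvSeqs (ops : List String) : List Int → List (List String)
  | [] => [[]]
  | _ :: t => ops.flatMap (fun op => (pvSeqs ops t).map (op :: ·))

-- B's snoc-building foldl equals prefix-extension by the prepend-form product
theorem pvSeqs_fold (ops : List String) (t : List Int) (ss : List (List String)) :
    t.foldl (fun ss _ => ss.flatMap (fun s => ops.map (fun op => s ++ [op]))) ss
      = ss.flatMap (fun s => (pvSeqs ops t).map (s ++ ·)) := by
  induction t generalizing ss with
  | nil => simp [pvSeqs]
  | cons x t ih =>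
    simp only [List.foldl_cons, ih, pvSeqs]
    simp [List.flatMap_assoc, Function.comp_def, List.map_flatMap, List.flatMap_map]

-- A's BFS layer fold equals flatMap of sequence evaluation, for any layer prev
theorem pvA_eq (combine : Bool) (t : List Int) (prev : List Int) :
    t.foldl (fun prev_vals x =>
      prev_vals.foldl (fun new_prev_vals y =>
        (new_prev_vals ++ [x + y] ++ [x * y]) ++
          (if combine then [pvCombineFn y x] else [])) []) prev
      = prev.flatMap (fun y =>
          (pvSeqs (if combine then ["+", "*", "||"] else ["+", "*"]) t).map
            (fun s => (s.zip t).foldl (fun acc p => pvApply p.1 acc p.2) y)) := by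
  induction t generalizing prev with
  | nil => simp [pvSeqs]
  | cons x t ih =>
    simp only [List.foldl_cons, ih]
    have hstep : ∀ y : Int,
        prev.foldl (fun new_prev_vals y =>
          (new_prev_vals ++ [x + y] ++ [x * y]) ++
            (if combine then [pvCombineFn y x] else [])) []
        = prev.flatMap (fun y =>
            (if combine then ["+", "*", "||"] else ["+", "*"]).map
              (fun op => pvApply op y x)) := by
      intro _
      rw [show (fun new_prev_vals y =>
          (new_prev_vals ++ [x + y] ++ [x * y]) ++
            (if combine then [pvCombineFn y x] else []))
        = (fun new_prev_vals y => new_prev_vals ++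
            ((if combine then ["+", "*", "||"] else ["+", "*"]).map
              (fun op => pvApply op y x))) from ?_]
      · exact (PySem.List.foldl_append_eq_flatMap _ _ _).trans (by simp)
      · funext acc y
        cases combine <;> simp [pvApply, pvCombineFn] <;> ring_nf <;> simp
    rw [hstep 0]
    simp only [pvSeqs, List.flatMap_assoc, List.map_flatMap, List.flatMap_map, List.map_map]
    refine List.flatMap_congr ?_
    intro y _
    refine List.flatMap_congr ?_
    intro op _
    simp [Function.comp_def]

-- ===== VERDICT (by name: the statement is the Claim_ definition above) =====
theorem all_possible_spec : Claim_equal_all_possible := by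
  intro input combine _ hpre
  unfold Spec_all_possible
  match input with
  | [] => exact absurd rfl hpre
  | h :: t =>
    show _ = all_possible_alt (h :: t) combine
    simp only [all_possible, all_possible_alt]
    rw [pvA_eq, pvSeqs_fold]
    simp
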